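-- pv_equiv track=rewrite | github.com/OmerFerster/Nand2Tetris | Exercise 6/Main.py | labels_until_me
-- ===== SOURCE A (Python) =====
-- def make_str_pretty(new_str: str) -> str:
--     new_str = new_str.strip()
--     space_ind = new_str.find(" ")
--     if space_ind != -1:
--         new_str = new_str[0:space_ind]
--     return new_str
--
-- def labels_until_me(label_name: str, input_arr: list) -> int:
--     counter = 0
--     for i in range(len(input_arr)):
--         new_str = make_str_pretty(input_arr[i])
--         if new_str != "" and new_str[0] == "(":
--             counter += 1
--             if new_str[1:-1] == label_name:
--                 break
--     return counter
-- ===== SOURCE B (Python) =====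
-- def make_str_pretty(new_str: str) -> str:
--     new_str = new_str.strip()
--     space_ind = new_str.find(" ")
--     if space_ind != -1:
--         new_str = new_str[0:space_ind]
--     return new_str
--
-- def labels_until_me(label_name: str, input_arr: list) -> int:
--     labels = []
--     for entry in input_arr:
--         cleaned = make_str_pretty(entry)
--         if cleaned != "" and cleaned[0] == "(":
--             labels.append(cleaned[1:-1])
--     return labels.index(label_name) + 1 if label_name in labels else len(labels)
-- ===== Notes on version B (the rewrite author's own statement) =====
-- stated objective: alternative
-- what changed: B replaces A's counting loop with early break by a collect-all-labels pass followed by a first-occurrence index lookup (index+1 if present, else the total label count).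
import Mathlib
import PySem

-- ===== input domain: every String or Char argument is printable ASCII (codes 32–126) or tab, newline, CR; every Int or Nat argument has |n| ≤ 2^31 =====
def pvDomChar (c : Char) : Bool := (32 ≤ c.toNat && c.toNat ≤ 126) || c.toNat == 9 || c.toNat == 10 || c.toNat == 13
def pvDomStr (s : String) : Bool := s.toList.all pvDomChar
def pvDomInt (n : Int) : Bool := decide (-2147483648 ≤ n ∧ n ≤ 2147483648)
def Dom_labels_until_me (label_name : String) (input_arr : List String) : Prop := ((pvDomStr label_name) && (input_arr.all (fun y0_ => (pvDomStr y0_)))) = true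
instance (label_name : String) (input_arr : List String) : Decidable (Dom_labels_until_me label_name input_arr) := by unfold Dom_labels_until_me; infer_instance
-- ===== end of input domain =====

-- A = B proved exactly; B replaces A's count-with-early-break loop by collect-all-label-names then first-index lookup.

-- ===== PORT A =====
def make_str_pretty (new_str : String) : String :=
  let s := PySem.Str.strip new_str
  let space_ind := PySem.Str.find s " "
  if space_ind ≠ -1 then PySem.Str.slice s (some 0) (some space_ind) else s

-- the for-loop of A, with `counter` as accumulator; `break` = returning immediately
def labels_until_me_go (label_name : String) : List String → Int → Int
  | [], counter => counter
  | s :: rest, counter =>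
    let new_str := make_str_pretty s
    if new_str ≠ "" ∧ PySem.Str.pyGet? new_str 0 = some '(' then
      if PySem.Str.slice new_str (some 1) (some (-1)) = label_name then counter + 1
      else labels_until_me_go label_name rest (counter + 1)
    else labels_until_me_go label_name rest counter

def labels_until_me (label_name : String) (input_arr : List String) : Int :=
  labels_until_me_go label_name input_arr 0

-- ===== PORT B =====
-- the collect pass of Source B: labels = [...]
def pvLabels (input_arr : List String) : List String :=
  input_arr.foldl (fun labels entry =>
    let cleaned := make_str_pretty entry
    if cleaned ≠ "" ∧ PySem.Str.pyGet? cleaned 0 = some '(' then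
      labels ++ [PySem.Str.slice cleaned (some 1) (some (-1))]
    else labels) []

def labels_until_me_alt (label_name : String) (input_arr : List String) : Int :=
  let labels := pvLabels input_arr
  match PySem.List.index? labels label_name with
  | some k => (k : Int) + 1
  | none => (labels.length : Int)

-- ===== PRECONDITION & SPEC =====
def Spec_labels_until_me (label_name : String) (input_arr : List String) (out : Int) : Prop := out = labels_until_me_alt label_name input_arr
instance (label_name : String) (input_arr : List String) (out : Int) : Decidable (Spec_labels_until_me label_name input_arr out) := by unfold Spec_labels_until_me; infer_instance

-- ===== CLAIM (what is proved, stated in full; the proofs are below) =====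
def Claim_equal_labels_until_me : Prop := ∀ (label_name : String) (input_arr : List String), Dom_labels_until_me label_name input_arr → Spec_labels_until_me label_name input_arr (labels_until_me label_name input_arr)

-- ===== LEMMAS AND PROOFS =====

-- recursive characterisation of the collected label list
def pvLabelsRec : List String → List String
  | [] => []
  | s :: rest =>
    if make_str_pretty s ≠ "" ∧ PySem.Str.pyGet? (make_str_pretty s) 0 = some '(' then
      PySem.Str.slice (make_str_pretty s) (some 1) (some (-1)) :: pvLabelsRec rest
    else pvLabelsRec rest

theorem pvLabels_foldl_eq (input_arr : List String) (acc : List String) :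
    input_arr.foldl (fun labels entry =>
      let cleaned := make_str_pretty entry
      if cleaned ≠ "" ∧ PySem.Str.pyGet? cleaned 0 = some '(' then
        labels ++ [PySem.Str.slice cleaned (some 1) (some (-1))]
      else labels) acc = acc ++ pvLabelsRec input_arr := by
  induction input_arr generalizing acc with
  | nil => simp only [List.foldl_nil, pvLabelsRec, List.append_nil]
  | cons s rest ih =>
    rw [List.foldl_cons]
    by_cases h : make_str_pretty s ≠ "" ∧ PySem.Str.pyGet? (make_str_pretty s) 0 = some '('
    · simp only [pvLabelsRec, if_pos h, ih, List.append_assoc, List.singleton_append]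
    · simp only [pvLabelsRec, if_neg h, ih]

theorem pvLabels_eq (input_arr : List String) : pvLabels input_arr = pvLabelsRec input_arr := by
  rw [pvLabels, pvLabels_foldl_eq, List.nil_append]

-- the value of B as a function of the collected list
def pvAnswer (label_name : String) (labels : List String) : Int :=
  match PySem.List.index? labels label_name with
  | some k => (k : Int) + 1
  | none => (labels.length : Int)

theorem labels_until_me_go_eq (label_name : String) (l : List String) (counter : Int) :
    labels_until_me_go label_name l counter = counter + pvAnswer label_name (pvLabelsRec l) := by
  induction l generalizing counter with
  | nil =>
    simp [labels_until_me_go, pvLabelsRec, pvAnswer, PySem.List.index?, List.idxOf?,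
      List.findIdx?, List.findIdx?.go]
  | cons s rest ih =>
    rw [labels_until_me_go]
    by_cases hc : make_str_pretty s ≠ "" ∧ PySem.Str.pyGet? (make_str_pretty s) 0 = some '('
    · rw [if_pos hc]
      by_cases heq : PySem.Str.slice (make_str_pretty s) (some 1) (some (-1)) = label_name
      · rw [if_pos heq, pvAnswer]
        simp only [pvLabelsRec, if_pos hc, heq, PySem.List.index?_cons_self]
        push_cast; ring
      · rw [if_neg heq, ih, pvAnswer, pvAnswer]
        simp only [pvLabelsRec, if_pos hc]
        rw [PySem.List.index?_cons_of_ne _ heq]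
        cases h : PySem.List.index? (pvLabelsRec rest) label_name with
        | none => simp only [Option.map_none, List.length_cons]; push_cast; ring
        | some k => simp only [Option.map]; push_cast; ring
    · rw [if_neg hc, ih, pvAnswer, pvAnswer]
      rw [show pvLabelsRec (s :: rest) = pvLabelsRec rest by
        rw [pvLabelsRec]; exact if_neg hc]

theorem labels_until_me_spec' (label_name : String) (input_arr : List String) :
    labels_until_me label_name input_arr = labels_until_me_alt label_name input_arr := by
  rw [labels_until_me, labels_until_me_alt, pvLabels_eq, labels_until_me_go_eq, pvAnswer,
    Int.zero_add]

-- ===== VERDICT (by name: the statement is the Claim_ definition above) =====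
theorem labels_until_me_spec : Claim_equal_labels_until_me := by
  intro label_name input_arr _
  exact labels_until_me_spec' label_name input_arr
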